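-- pv_equiv track=rewrite | github.com/johnnyrayalt/python-scrabble-game | main3.py | is_valid_word
-- ===== SOURCE A (Python) =====
-- VOWELS = 'aeiou'
--
-- def is_valid_word(word, hand, word_list):
--     valid_wildcard_list = []
--     hand_copy = hand.copy()
--
--     def check_word_to_hand(word_to_validate):
--         word_to_validate = word_to_validate.lower()
--         passed = True
--         for char in word_to_validate:
--             if char in hand_copy.keys():
--                 hand_copy[char] -= 1
--                 if hand_copy[char] < 0:
--                     passed = False
--             else:
--                 passed = False
--
--         if passed is True:
--             return True
--         else:
--             return False
--
--     def wildcard_validity_check(word_to_check):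
--         word_to_check = word_to_check.lower()
--         passed = True
--         for vowel in VOWELS:
--             is_valid_wildcard = word_to_check.replace('*', vowel)
--
--             if is_valid_wildcard in word_list:
--                 valid_wildcard_list.append(is_valid_wildcard)
--
--         if len(valid_wildcard_list) == 0:
--             passed = False
--
--         if passed is True:
--             return True
--         else:
--             return False
--
--     if '*' in word:
--         is_valid = wildcard_validity_check(word)
--         if is_valid is True and check_word_to_hand(word) is True:
--             return True
--     else:
--         if check_word_to_hand(word) is True:
--             return True
-- ===== SOURCE B (Python) =====
-- VOWELS = 'aeiou'
--
-- def _matches(w, entry):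
--     # does entry arise from w by substituting every '*' with one single vowel?
--     if len(entry) != len(w):
--         return False
--     sub = None
--     for a, b in zip(w, entry):
--         if a == '*':
--             if sub is None:
--                 sub = b
--             elif b != sub:
--                 return False
--         elif a != b:
--             return False
--     return sub in VOWELS
--
-- def is_valid_word(word, hand, word_list):
--     w = word.lower()
--     # hand-fit: sort the word, scan runs of equal letters, compare each run length to the hand
--     s = sorted(w)
--     fits = True
--     i = 0
--     while i < len(s):
--         j = i
--         while j < len(s) and s[j] == s[i]:
--             j += 1
--         if s[i] not in hand or j - i > hand[s[i]]:
--             fits = False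
--         i = j
--     if '*' not in word:
--         return True if fits else None
--     if fits and any(_matches(w, entry) for entry in word_list):
--         return True
-- ===== Notes on version B (the rewrite author's own statement) =====
-- stated objective: alternative
-- what changed: B checks the hand fit by sorting the word and scanning runs of equal letters (run length vs hand count) instead of A's sequential decrement of a hand copy with a failure flag, and detects a wildcard dictionary hit by scanning the word list with a pattern matcher (every '*' position must carry one common vowel) instead of A's five vowel substitutions tested for membership.
import Mathlib
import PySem

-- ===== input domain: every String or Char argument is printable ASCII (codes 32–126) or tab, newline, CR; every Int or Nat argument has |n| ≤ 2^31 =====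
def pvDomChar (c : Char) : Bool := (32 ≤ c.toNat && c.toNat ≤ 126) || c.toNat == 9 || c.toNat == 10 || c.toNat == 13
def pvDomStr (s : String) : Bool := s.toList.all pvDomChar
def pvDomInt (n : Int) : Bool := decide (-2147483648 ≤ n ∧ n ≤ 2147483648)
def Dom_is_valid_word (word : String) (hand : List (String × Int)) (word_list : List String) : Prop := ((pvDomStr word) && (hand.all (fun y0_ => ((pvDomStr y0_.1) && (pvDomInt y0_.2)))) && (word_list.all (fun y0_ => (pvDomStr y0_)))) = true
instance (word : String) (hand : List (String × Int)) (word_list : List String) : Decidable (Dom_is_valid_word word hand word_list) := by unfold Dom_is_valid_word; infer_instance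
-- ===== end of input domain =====

-- B checks the hand fit by sorting the word and scanning runs of equal letters, and finds a
-- wildcard dictionary hit by pattern-matching each word-list entry instead of substituting
-- each vowel and testing membership (objective: alternative).


-- ===== PORT A =====
-- one loop step of check_word_to_hand: state = (hand_copy, passed)
def pvStepA (st : PySem.Dict String Int × Bool) (ch : Char) : PySem.Dict String Int × Bool :=
  let cs := String.ofList [ch]
  if st.1.contains cs then
    let hc := st.1.insert cs (st.1.getD cs 0 - 1)
    if hc.getD cs 0 < 0 then (hc, false) else (hc, st.2)
  else (st.1, false)

def is_valid_word (word : String) (hand : List (String × Int)) (word_list : List String) : Option Bool :=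
  -- check_word_to_hand(word): lower, then decrement hand_copy per char, flagging failures
  let checkWordToHand : String → Bool := fun wtv =>
    ((PySem.Str.lower wtv).toList.foldl pvStepA (PySem.Dict.mk hand, true)).2
  -- wildcard_validity_check(word): collect matching vowel substitutions, passed iff list nonempty
  let wildcardValidityCheck : String → Bool := fun wtc =>
    let validWildcardList := "aeiou".toList.foldl (fun (acc : List String) v =>
      let isValidWildcard := PySem.Str.replace (PySem.Str.lower wtc) "*" (String.ofList [v])
      if isValidWildcard ∈ word_list then acc ++ [isValidWildcard] else acc) []
    !(validWildcardList.length == 0)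
  if PySem.Str.isIn "*" word then
    if wildcardValidityCheck word && checkWordToHand word then some true else none
  else
    if checkWordToHand word then some true else none

-- ===== PORT B =====
-- _matches' zip loop; sub = None ↦ none (the final 'sub in VOWELS' is only reached with sub set,
-- since every caller passes a w containing '*'; the none branch is that unreachable path)
def pvMatchGo : Option Char → List (Char × Char) → Bool
  | sub, [] => match sub with
    | some s => "aeiou".toList.contains s
    | none => false
  | sub, (a, b) :: rest =>
    if a == '*' then
      match sub with
      | none => pvMatchGo (some b) rest
      | some s => if b != s then false else pvMatchGo (some s) rest
    else if a != b then false else pvMatchGo sub rest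

-- _matches(w, entry)
def pvMatches (w entry : List Char) : Bool :=
  if entry.length != w.length then false else pvMatchGo none (w.zip entry)

-- the while loop over the sorted word: one call per run of equal letters
def pvRunCheck (hd : PySem.Dict String Int) : List Char → Bool
  | [] => true
  | c :: rest =>
    let run := rest.takeWhile (fun x => x == c)
    let rem := rest.dropWhile (fun x => x == c)
    let ok := hd.contains (String.ofList [c]) &&
      !decide ((((1 + run.length : Nat) : Int)) > hd.getD (String.ofList [c]) 0)
    ok && pvRunCheck hd rem
termination_by l => l.length
decreasing_by
  simpa using Nat.lt_succ_of_le (List.length_dropWhile_le (fun x => x == c) rest)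

def is_valid_word_alt (word : String) (hand : List (String × Int)) (word_list : List String) : Option Bool :=
  let w := PySem.Str.lower word
  let s := PySem.List.sorted w.toList (fun x => x) false
  let fits := pvRunCheck (PySem.Dict.mk hand) s
  if !(PySem.Str.isIn "*" word) then
    if fits then some true else none
  else
    if fits && word_list.any (fun entry => pvMatches w.toList entry.toList) then some true
    else none

-- ===== PRECONDITION & SPEC =====
def Spec_is_valid_word (word : String) (hand : List (String × Int)) (word_list : List String) (out : Option Bool) : Prop := out = is_valid_word_alt word hand word_list
instance (word : String) (hand : List (String × Int)) (word_list : List String) (out : Option Bool) : Decidable (Spec_is_valid_word word hand word_list out) := by unfold Spec_is_valid_word; infer_instance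

-- ===== CLAIM (what is proved, stated in full; the proofs are below) =====
def Claim_equal_is_valid_word : Prop := ∀ (word : String) (hand : List (String × Int)) (word_list : List String), Dom_is_valid_word word hand word_list → Spec_is_valid_word word hand word_list (is_valid_word word hand word_list)

-- ===== LEMMAS AND PROOFS =====

-- the one-char-string key is injective in the char
theorem pvOfListSingleton_inj {a b : Char} (h : String.ofList [a] = String.ofList [b]) : a = b := by
  simpa using congrArg String.toList h

-- A's step: the dict component ignores the flag, the flag component only ANDs new conditions
theorem pvStepA_flag (st : PySem.Dict String Int × Bool) (ch : Char) :
    pvStepA st ch = ((pvStepA (st.1, true) ch).1, st.2 && (pvStepA (st.1, true) ch).2) := by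
  simp only [pvStepA]
  split_ifs <;> simp

theorem pvFoldA_flag (l : List Char) (d : PySem.Dict String Int) (b : Bool) :
    l.foldl pvStepA (d, b) = ((l.foldl pvStepA (d, true)).1, b && (l.foldl pvStepA (d, true)).2) := by
  induction l generalizing d b with
  | nil => simp
  | cons c l ih =>
    simp only [List.foldl_cons]
    rw [pvStepA_flag (d, b) c]
    rcases h : pvStepA (d, true) c with ⟨d', b'⟩
    rw [ih d' (b && b'), ih d' b']
    simp [Bool.and_assoc]

-- characterisation of A's decrement pass: it passes iff every char of l is a hand key
-- with at least as many copies in hand as in l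
theorem pvFoldA_char (l : List Char) (d : PySem.Dict String Int) :
    (l.foldl pvStepA (d, true)).2 = true ↔
      ∀ c ∈ l, ∃ v, d.get? (String.ofList [c]) = some v ∧ (l.count c : Int) ≤ v := by
  induction l generalizing d with
  | nil => simp
  | cons c l ih =>
    simp only [List.foldl_cons]
    by_cases hc : d.contains (String.ofList [c]) = true
    · obtain ⟨v0, hv0⟩ : ∃ v0, d.get? (String.ofList [c]) = some v0 := by
        rw [PySem.Dict.contains_eq_isSome_get?] at hc
        exact Option.isSome_iff_exists.mp hc
      have hgd : d.getD (String.ofList [c]) 0 = v0 :=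
        PySem.Dict.getD_of_get?_eq_some d 0 hv0
      have hstep : pvStepA (d, true) c =
          (d.insert (String.ofList [c]) (v0 - 1), !(decide (v0 - 1 < 0))) := by
        simp only [pvStepA, hc, if_true, hgd, PySem.Dict.getD_insert_self]
        split_ifs with h <;> simp [h]
      rw [hstep]
      by_cases hneg : v0 - 1 < 0
      · simp only [hneg, decide_true, Bool.not_true]
        rw [pvFoldA_flag]
        simp only [Bool.false_and, Bool.false_eq_true, false_iff, not_forall]
        push Not
        refine ⟨c, by simp, ?_⟩
        rintro v hv
        rw [hv0] at hv; injection hv with hv; subst hv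
        simp only [List.count_cons_self]
        push_cast
        omega
      · simp only [hneg, decide_false, Bool.not_false]
        rw [pvFoldA_flag]
        simp only [Bool.true_and]
        rw [ih]
        constructor
        · intro h c' hc'
          by_cases hcc : c' = c
          · subst hcc
            refine ⟨v0, hv0, ?_⟩
            by_cases hmem : c' ∈ l
            · obtain ⟨v, hv, hle⟩ := h c' hmem
              rw [PySem.Dict.get?_insert_self] at hv
              injection hv with hv; subst hv
              simp only [List.count_cons_self]
              push_cast
              omega
            · have : l.count c' = 0 := List.count_eq_zero.mpr hmem
              simp only [List.count_cons_self, this]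
              push_cast
              omega
          · have hne : String.ofList [c'] ≠ String.ofList [c] :=
              fun he => hcc (pvOfListSingleton_inj he)
            have hmem : c' ∈ l := by
              rcases List.mem_cons.mp hc' with h1 | h1
              · exact absurd h1 hcc
              · exact h1
            obtain ⟨v, hv, hle⟩ := h c' hmem
            rw [PySem.Dict.get?_insert_of_ne d _ hne] at hv
            refine ⟨v, hv, ?_⟩
            rw [List.count_cons_of_ne (Ne.symm hcc)]; exact hle
        · intro h c' hc'
          by_cases hcc : c' = c
          · subst hcc
            obtain ⟨v, hv, hle⟩ := h c' (List.mem_cons_self ..)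
            rw [hv0] at hv; injection hv with hv; subst hv
            refine ⟨v0 - 1, PySem.Dict.get?_insert_self .., ?_⟩
            simp only [List.count_cons_self] at hle
            push_cast at hle
            omega
          · have hne : String.ofList [c'] ≠ String.ofList [c] :=
              fun he => hcc (pvOfListSingleton_inj he)
            obtain ⟨v, hv, hle⟩ := h c' (List.mem_cons_of_mem _ hc')
            refine ⟨v, ?_, ?_⟩
            · rw [PySem.Dict.get?_insert_of_ne d _ hne]; exact hv
            · rw [List.count_cons_of_ne (Ne.symm hcc)] at hle; exact hle
    · have hstep : pvStepA (d, true) c = (d, false) := by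
        simp [pvStepA, hc]
      rw [hstep, pvFoldA_flag]
      simp only [Bool.false_and, Bool.false_eq_true, false_iff, not_forall]
      push Not
      refine ⟨c, by simp, ?_⟩
      rintro v hv
      rw [PySem.Dict.contains_eq_isSome_get?, hv] at hc
      simp at hc

-- the head of a dropWhile result falsifies the predicate
theorem pvDropWhile_head {α : Type} (p : α → Bool) (l : List α) (h t : _)
    (he : l.dropWhile p = h :: t) : p h = false := by
  induction l with
  | nil => simp at he
  | cons a l ih =>
    rw [List.dropWhile_cons] at he
    by_cases hp : p a = true
    · rw [if_pos hp] at he; exact ih he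
    · rw [if_neg hp] at he
      injection he with h1 _
      subst h1
      exact Bool.eq_false_iff.mpr hp

-- characterisation of B's run scan on a sorted list
theorem pvRunCheck_char_aux (hd : PySem.Dict String Int) :
    ∀ (n : Nat) (s : List Char), s.length ≤ n → s.Pairwise (· ≤ ·) →
    (pvRunCheck hd s = true ↔
      ∀ c ∈ s, ∃ v, hd.get? (String.ofList [c]) = some v ∧ (s.count c : Int) ≤ v) := by
  intro n
  induction n with
  | zero =>
    intro s hlen _
    have : s = [] := List.length_eq_zero_iff.mp (Nat.le_zero.mp hlen)
    subst this
    simp [pvRunCheck]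
  | succ n ih =>
    intro s hlen hpair
    cases s with
    | nil => simp [pvRunCheck]
    | cons c rest =>
      have hrw : pvRunCheck hd (c :: rest) =
          ((hd.contains (String.ofList [c]) &&
            !decide ((((1 + (rest.takeWhile (fun x => x == c)).length : Nat) : Int)) >
              hd.getD (String.ofList [c]) 0)) &&
            pvRunCheck hd (rest.dropWhile (fun x => x == c))) := by
        rw [pvRunCheck]
      set run := rest.takeWhile (fun x => x == c) with hrundef
      set rem := rest.dropWhile (fun x => x == c) with hremdef
      have hsplit : run ++ rem = rest := List.takeWhile_append_dropWhile
      have hrun : ∀ x ∈ run, x = c := by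
        intro x hx
        have := List.mem_takeWhile_imp hx
        simpa using this
      have hrestpair : rest.Pairwise (· ≤ ·) := (List.pairwise_cons.mp hpair).2
      have hcle : ∀ y ∈ rest, c ≤ y := (List.pairwise_cons.mp hpair).1
      have hrempair : rem.Pairwise (· ≤ ·) :=
        List.Pairwise.sublist (List.dropWhile_sublist (fun x => x == c)) hrestpair
      have hcrem : c ∉ rem := by
        intro hc
        cases hr : rem with
        | nil => rw [hr] at hc; simp at hc
        | cons h t =>
          have hh : (h == c) = false := by
            simpa using pvDropWhile_head (fun x => x == c) rest h t (hremdef.symm.trans hr)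
          have hhc : h ≠ c := by simpa using hh
          have hhrest : h ∈ rest := by
            rw [← hsplit, hr]; simp
          have hch : c ≤ h := hcle h hhrest
          rw [hr] at hc
          rcases List.mem_cons.mp hc with rfl | hct
          · exact hhc rfl
          · have hhc' : h ≤ c := (List.pairwise_cons.mp (hr ▸ hrempair)).1 c hct
            exact hhc (le_antisymm hhc' hch)
      have hcountc : (c :: rest).count c = 1 + run.length := by
        rw [List.count_cons_self, ← hsplit, List.count_append,
          List.count_eq_length.mpr (fun b hb => (hrun b hb).symm),
          List.count_eq_zero.mpr hcrem]
        omega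
      have hcountne : ∀ c', c' ≠ c → (c :: rest).count c' = rem.count c' := by
        intro c' hne
        rw [List.count_cons_of_ne (Ne.symm hne), ← hsplit, List.count_append,
          List.count_eq_zero.mpr (fun hc' => hne (hrun c' hc'))]
        omega
      have hmemrem : ∀ c' ∈ rem, c' ∈ c :: rest := by
        intro c' hc'
        exact List.mem_cons_of_mem _ (by rw [← hsplit]; exact List.mem_append_right _ hc')
      have hmem2 : ∀ c' ∈ c :: rest, c' ≠ c → c' ∈ rem := by
        intro c' hc' hne
        rcases List.mem_cons.mp hc' with rfl | hc'
        · exact absurd rfl hne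
        · rw [← hsplit] at hc'
          rcases List.mem_append.mp hc' with h | h
          · exact absurd (hrun c' h) hne
          · exact h
      have hremlen : rem.length ≤ n := by
        have h1 : rem.length ≤ rest.length := hremdef ▸ List.length_dropWhile_le _ _
        have h2 : rest.length + 1 ≤ n + 1 := by simpa using hlen
        omega
      rw [hrw, Bool.and_eq_true, ih rem hremlen hrempair]
      constructor
      · rintro ⟨hok, hrem⟩ c' hc'
        rw [Bool.and_eq_true] at hok
        by_cases hne : c' = c
        · subst hne
          obtain ⟨v, hv⟩ : ∃ v, hd.get? (String.ofList [c']) = some v := by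
            have h1 := hok.1
            rw [PySem.Dict.contains_eq_isSome_get?] at h1
            exact Option.isSome_iff_exists.mp h1
          refine ⟨v, hv, ?_⟩
          have hgd := PySem.Dict.getD_of_get?_eq_some hd (0 : Int) hv
          have := hok.2
          rw [hgd] at this
          rw [hcountc]
          simp only [Bool.not_eq_true', decide_eq_false_iff_not, not_lt] at this
          push_cast at this ⊢
          omega
        · obtain ⟨v, hv, hle⟩ := hrem c' (hmem2 c' hc' hne)
          refine ⟨v, hv, ?_⟩
          rw [hcountne c' hne]
          exact hle
      · intro h
        refine ⟨?_, ?_⟩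
        · obtain ⟨v, hv, hle⟩ := h c (List.mem_cons_self ..)
          have hct : hd.contains (String.ofList [c]) = true := by
            rw [PySem.Dict.contains_eq_isSome_get?, hv]; rfl
          have hgd := PySem.Dict.getD_of_get?_eq_some hd (0 : Int) hv
          rw [Bool.and_eq_true]
          refine ⟨hct, ?_⟩
          rw [hgd, hcountc] at *
          simp only [Bool.not_eq_true', decide_eq_false_iff_not, not_lt]
          push_cast at hle ⊢
          omega
        · intro c' hc'
          have hne : c' ≠ c := fun he => hcrem (he ▸ hc')
          obtain ⟨v, hv, hle⟩ := h c' (hmemrem c' hc')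
          refine ⟨v, hv, ?_⟩
          rw [hcountne c' hne] at hle
          exact hle

theorem pvRunCheck_char (hd : PySem.Dict String Int) (s : List Char)
    (hs : s.Pairwise (· ≤ ·)) :
    pvRunCheck hd s = true ↔
      ∀ c ∈ s, ∃ v, hd.get? (String.ofList [c]) = some v ∧ (s.count c : Int) ≤ v :=
  pvRunCheck_char_aux hd s.length s (le_refl _) hs

-- A's checkWordToHand equals B's sorted-run fit
theorem pvCheck_eq_fits (word : String) (hand : List (String × Int)) :
    ((PySem.Str.lower word).toList.foldl pvStepA (PySem.Dict.mk hand, true)).2 =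
    pvRunCheck (PySem.Dict.mk hand)
      (PySem.List.sorted (PySem.Str.lower word).toList (fun x => x) false) := by
  have hperm : (PySem.List.sorted (PySem.Str.lower word).toList (fun x => x) false).Perm
      (PySem.Str.lower word).toList := PySem.List.sorted_perm ..
  rw [Bool.eq_iff_iff, pvFoldA_char,
    pvRunCheck_char _ _ (by simpa using PySem.List.sorted_pairwise (PySem.Str.lower word).toList (fun x => x))]
  constructor
  · intro h c hc
    obtain ⟨v, hv, hle⟩ := h c (hperm.mem_iff.mp hc)
    exact ⟨v, hv, by rwa [hperm.count_eq]⟩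
  · intro h c hc
    obtain ⟨v, hv, hle⟩ := h c (hperm.mem_iff.mpr hc)
    exact ⟨v, hv, by rwa [hperm.count_eq] at hle⟩

-- replace with the single-char pattern '*' is a character map
theorem pvReplaceGo (v : Char) : ∀ (l : List Char) (fuel : Nat) (acc : List Char), l.length ≤ fuel →
    PySem.Chars.replace.go ['*'] [v] fuel l acc =
      acc.reverse ++ l.map (fun c => if c == '*' then v else c) := by
  intro l
  induction l with
  | nil =>
    intro fuel acc _
    cases fuel <;> simp [PySem.Chars.replace.go]
  | cons c t ih =>
    intro fuel acc hlen
    cases fuel with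
    | zero => simp at hlen
    | succ f =>
      rw [PySem.Chars.replace.go]
      by_cases hc : c = '*'
      · subst hc
        have hpre : List.isPrefixOf ['*'] ('*' :: t) = true := by simp [List.isPrefixOf]
        rw [if_pos hpre]
        simp only [List.length_cons, List.drop_succ_cons, List.length_nil, List.drop_zero]
        simp only [List.length_cons] at hlen
        rw [ih f _ (by omega)]
        simp
      · have hpre : List.isPrefixOf ['*'] (c :: t) = false := by
          simp [List.isPrefixOf, Ne.symm hc]
        rw [if_neg (by simp [hpre])]
        simp only [List.length_cons] at hlen
        rw [ih f _ (by omega)]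
        simp [hc]

theorem pvReplace_star (w : List Char) (v : Char) :
    PySem.Chars.replace w ['*'] [v] = w.map (fun c => if c == '*' then v else c) := by
  rw [PySem.Chars.replace]
  simp only [List.isEmpty_cons]
  exact (pvReplaceGo v w w.length [] (le_refl _)).trans (by simp)

-- pvMatchGo: one step with sub already set
theorem pvMatchGo_some_step (s : Char) (a b : Char) (t : List (Char × Char)) :
    pvMatchGo (some s) ((a, b) :: t) =
      ((if a == '*' then b == s else a == b) && pvMatchGo (some s) t) := by
  cases ha : a == '*' <;> cases hb : b == s <;> cases hab : a == b <;>
    simp [pvMatchGo, ha, hb, hab, bne]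

-- pvMatchGo with sub already set
theorem pvMatchGo_some (s : Char) (ps : List (Char × Char)) :
    pvMatchGo (some s) ps =
      (ps.all (fun p => if p.1 == '*' then p.2 == s else p.1 == p.2) &&
        "aeiou".toList.contains s) := by
  induction ps with
  | nil => simp [pvMatchGo]
  | cons p t ih =>
    rcases p with ⟨a, b⟩
    rw [pvMatchGo_some_step, ih, List.all_cons, Bool.and_assoc]

-- pvMatchGo from None, when some first component is '*'
theorem pvMatchGo_none (ps : List (Char × Char)) (hstar : ∃ p ∈ ps, p.1 = '*') :
    (pvMatchGo none ps = true ↔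
      ∃ v ∈ "aeiou".toList,
        ps.all (fun p => if p.1 == '*' then p.2 == v else p.1 == p.2) = true) := by
  induction ps with
  | nil => simp at hstar
  | cons p t ih =>
    rcases p with ⟨a, b⟩
    by_cases ha : a = '*'
    · subst ha
      have hgo : pvMatchGo none (('*', b) :: t) = pvMatchGo (some b) t := by
        simp [pvMatchGo]
      rw [hgo, pvMatchGo_some]
      constructor
      · intro h
        rw [Bool.and_eq_true] at h
        refine ⟨b, List.contains_iff_mem.mp h.2, ?_⟩
        rw [List.all_cons, Bool.and_eq_true]
        exact ⟨by simp, h.1⟩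
      · rintro ⟨v, hv, hall⟩
        rw [List.all_cons, Bool.and_eq_true] at hall
        have hbv : b = v := by simpa using hall.1
        subst hbv
        rw [Bool.and_eq_true]
        exact ⟨hall.2, List.contains_iff_mem.mpr hv⟩
    · have hane : (a == '*') = false := by simpa using ha
      have hstar' : ∃ p ∈ t, p.1 = '*' := by
        rcases hstar with ⟨q, hq, hq1⟩
        rcases List.mem_cons.mp hq with rfl | hq'
        · exact absurd hq1 ha
        · exact ⟨q, hq', hq1⟩
      by_cases hab : a = b
      · subst hab
        have hgo : pvMatchGo none ((a, a) :: t) = pvMatchGo none t := by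
          simp [pvMatchGo, hane]
        rw [hgo, ih hstar']
        refine exists_congr fun v => and_congr_right fun _ => ?_
        rw [List.all_cons]
        simp [hane]
      · have habf : (a == b) = false := by simpa using hab
        have hgo : pvMatchGo none ((a, b) :: t) = false := by
          simp [pvMatchGo, hane, habf, bne]
        rw [hgo]
        simp only [Bool.false_eq_true, false_iff]
        rintro ⟨v, _, hall⟩
        rw [List.all_cons, Bool.and_eq_true] at hall
        rw [hane] at hall
        simp only [Bool.false_eq_true, if_false] at hall
        exact absurd hall.1 (by simp [habf])

-- map equality read through zip (equal lengths)
theorem pvMapEqZip (f : Char → Char) (w : List Char) : ∀ (e : List Char), e.length = w.length →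
    (w.map f = e ↔ (w.zip e).all (fun p => f p.1 == p.2) = true) := by
  induction w with
  | nil => intro e he; rw [List.length_nil, List.length_eq_zero_iff] at he; subst he; simp
  | cons a w ih =>
    intro e he
    cases e with
    | nil => simp at he
    | cons b e =>
      rw [List.length_cons, List.length_cons, Nat.succ_inj] at he
      rw [List.map_cons, List.zip_cons_cons, List.all_cons, Bool.and_eq_true, List.cons_eq_cons,
        ih e he]
      constructor
      · rintro ⟨h1, h2⟩; exact ⟨by simp [h1], h2⟩
      · rintro ⟨h1, h2⟩; exact ⟨by simpa using h1, h2⟩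

-- pvMatches characterised: entry arises from w by one common vowel substitution
theorem pvMatches_char (w e : List Char) (hstar : '*' ∈ w) :
    pvMatches w e = true ↔
      ∃ v ∈ "aeiou".toList, w.map (fun c => if c == '*' then v else c) = e := by
  by_cases hlen : e.length = w.length
  · have h0 : pvMatches w e = pvMatchGo none (w.zip e) := by
      simp [pvMatches, hlen]
    have hpair : ∃ p ∈ w.zip e, p.1 = '*' := by
      have hmap : (w.zip e).map Prod.fst = w := List.map_fst_zip (le_of_eq hlen.symm)
      rw [← hmap] at hstar
      rcases List.mem_map.mp hstar with ⟨p, hp, hp1⟩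
      exact ⟨p, hp, hp1⟩
    rw [h0, pvMatchGo_none _ hpair]
    refine exists_congr fun v => and_congr_right fun _ => ?_
    rw [pvMapEqZip _ _ e hlen]
    simp only [List.all_eq_true]
    refine forall₂_congr fun p _ => ?_
    by_cases hp : (p.1 == '*') = true
    · simp only [hp, if_true, beq_iff_eq]
      exact eq_comm
    · simp [Bool.eq_false_iff.mpr (fun h => hp h)]
  · have h0 : pvMatches w e = false := by
      simp only [pvMatches]
      rw [if_pos (by simpa using hlen)]
    rw [h0]
    simp only [Bool.false_eq_true, false_iff]
    rintro ⟨v, _, hmap⟩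
    exact hlen (by rw [← hmap, List.length_map])

theorem pvScan_eq (lw : String) (word_list : List String) (hstar : '*' ∈ lw.toList) :
    (word_list.any (fun entry => pvMatches lw.toList entry.toList)) =
    "aeiou".toList.any (fun v => PySem.Str.replace lw "*" (String.ofList [v]) ∈ word_list) := by
  have hrep : ∀ v : Char, (PySem.Str.replace lw "*" (String.ofList [v])).toList =
      lw.toList.map (fun c => if c == '*' then v else c) := by
    intro v
    rw [PySem.Str.toList_replace]
    have h1 : "*".toList = ['*'] := by decide
    have h2 : (String.ofList [v]).toList = [v] := by simp
    rw [h1, h2, pvReplace_star]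
  rw [Bool.eq_iff_iff, List.any_eq_true, List.any_eq_true]
  simp only [decide_eq_true_eq]
  constructor
  · rintro ⟨entry, hmem, hm⟩
    obtain ⟨v, hv, hmap⟩ := (pvMatches_char _ _ hstar).mp hm
    refine ⟨v, hv, ?_⟩
    have : PySem.Str.replace lw "*" (String.ofList [v]) = entry :=
      String.toList_inj.mp (by rw [hrep v, hmap])
    rwa [this]
  · rintro ⟨v, hv, hmem⟩
    refine ⟨_, hmem, ?_⟩
    exact (pvMatches_char _ _ hstar).mpr ⟨v, hv, (hrep v).symm⟩

-- A's nonempty-accumulator test is an any-test over the vowels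
theorem pvWildcard_eq (word : String) (word_list : List String) :
    (!(("aeiou".toList.foldl (fun (acc : List String) v =>
        if PySem.Str.replace (PySem.Str.lower word) "*" (String.ofList [v]) ∈ word_list then
          acc ++ [PySem.Str.replace (PySem.Str.lower word) "*" (String.ofList [v])] else acc) []).length == 0)) =
    "aeiou".toList.any (fun v => PySem.Str.replace (PySem.Str.lower word) "*" (String.ofList [v]) ∈ word_list) := by
  by_cases h1 : PySem.Str.replace (PySem.Str.lower word) "*" (String.ofList ['a']) ∈ word_list <;>
    by_cases h2 : PySem.Str.replace (PySem.Str.lower word) "*" (String.ofList ['e']) ∈ word_list <;>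
      by_cases h3 : PySem.Str.replace (PySem.Str.lower word) "*" (String.ofList ['i']) ∈ word_list <;>
        by_cases h4 : PySem.Str.replace (PySem.Str.lower word) "*" (String.ofList ['o']) ∈ word_list <;>
          by_cases h5 : PySem.Str.replace (PySem.Str.lower word) "*" (String.ofList ['u']) ∈ word_list <;>
            simp [List.foldl, h1, h2, h3, h4, h5]

-- ===== VERDICT (by name: the statement is the Claim_ definition above) =====
theorem is_valid_word_spec : Claim_equal_is_valid_word := by
  intro word hand word_list _
  unfold Spec_is_valid_word is_valid_word is_valid_word_alt
  by_cases hstar : PySem.Str.isIn "*" word = true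
  · have hstar' : '*' ∈ (PySem.Str.lower word).toList := by
      have h1 : '*' ∈ word.toList := by
        have := (PySem.Str.isIn_iff_infix ..).mp hstar
        have h2 : "*".toList = ['*'] := by decide
        rw [h2] at this
        exact this.mem (List.mem_singleton_self _)
      rw [PySem.Str.toList_lower]
      simp only [PySem.Chars.lower]
      exact List.mem_map.mpr ⟨'*', h1, by decide⟩
    simp only [hstar, Bool.not_true, if_true, Bool.false_eq_true, if_false,
      pvCheck_eq_fits word hand, pvWildcard_eq word word_list,
      pvScan_eq (PySem.Str.lower word) word_list hstar', Bool.and_comm]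
  · have hstar0 : PySem.Str.isIn "*" word = false := Bool.eq_false_iff.mpr hstar
    simp only [hstar0, Bool.not_false, if_true, Bool.false_eq_true, if_false,
      pvCheck_eq_fits word hand]
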